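-- pv_equiv track=rewrite | github.com/DanielDobromylskyj/LMC-Compiler-v2 | compiler.py | operationSplit
-- ===== SOURCE A (Python) =====
-- def operationSplit(data: list, char):
--     output = []
--     for item in data:
--         if char in item:
--             segments = item.split(char)
--             for segment in segments:
--                 output.append(segment)
--                 output.append(char)
--             output.pop(-1)  # remove extra char
--         else:
--             output.append(item)
--
--     return output
-- ===== SOURCE B (Python) =====
-- def operationSplit(data, char):
--     output = []
--     for item in data:
--         if not char:
--             raise ValueError("empty separator")
--         rest = item
--         while True:
--             i = rest.find(char)
--             if i < 0:
--                 output.append(rest)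
--                 break
--             output.append(rest[:i])
--             output.append(char)
--             rest = rest[i + len(char):]
--     return output
-- ===== Notes on version B (the rewrite author's own statement) =====
-- stated objective: alternative
-- what changed: B never calls split, never builds an interleaved list and never pops: it is a cursor scanner that repeatedly str.find()s the next delimiter and emits the segment before it, the delimiter, and finally the tail, so the membership test, the inner interleave loop and the trailing pop all disappear.
import Mathlib
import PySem

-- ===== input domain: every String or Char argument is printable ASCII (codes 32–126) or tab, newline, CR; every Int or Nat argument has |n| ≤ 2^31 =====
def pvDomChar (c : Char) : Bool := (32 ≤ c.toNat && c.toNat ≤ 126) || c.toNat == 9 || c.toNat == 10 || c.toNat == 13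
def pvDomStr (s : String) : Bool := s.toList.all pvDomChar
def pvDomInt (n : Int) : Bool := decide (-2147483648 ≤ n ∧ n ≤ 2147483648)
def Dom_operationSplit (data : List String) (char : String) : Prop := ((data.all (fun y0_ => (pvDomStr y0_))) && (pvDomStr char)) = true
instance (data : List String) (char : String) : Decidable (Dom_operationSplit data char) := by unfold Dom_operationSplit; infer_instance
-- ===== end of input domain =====

-- B replaces A's split/interleave/pop by a cursor scanner: repeatedly find the next
-- delimiter and emit segment + delimiter, then the tail; objective: alternative.

-- ===== PORT A =====
def operationSplit (data : List String) (char : String) : List String :=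
  data.foldl (fun output item =>
    if PySem.Str.isIn char item then
      match PySem.Str.split? item char with
      | some segments =>
        let out2 := segments.foldl (fun o seg => o ++ [seg, char]) output
        match PySem.List.pop? out2 (-1) with
        | some (_, o) => o
        | none => []          -- IndexError (unreachable: out2 is nonempty here)
      | none => []            -- ValueError: char = "" (excluded by Pre_)
    else output ++ [item]) []

-- ===== PORT B =====
-- the 'while True' scan over one item: find the next occurrence of sep, emit the piece
-- before it and sep, continue after it; fuel = rest.length + 1 (the loop consumes ≥ 1
-- character of rest per iteration since sep ≠ [])
def pvScan (sep : List Char) : Nat → List Char → List String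
  | 0, _ => []                -- fuel exhausted (unreachable for sep ≠ [])
  | fuel + 1, rest =>
    let i := PySem.Chars.find rest sep
    if i < 0 then [String.ofList rest]
    else String.ofList (PySem.List.slice rest none (some i)) :: String.ofList sep ::
         pvScan sep fuel (PySem.List.slice rest (some (i + sep.length)) none)

def operationSplit_alt (data : List String) (char : String) : List String :=
  data.foldl (fun output item =>
    if char.toList.isEmpty then output   -- ValueError in Python B (excluded by Pre_)
    else output ++ pvScan char.toList (item.toList.length + 1) item.toList) []

-- ===== PRECONDITION & SPEC =====
-- Pre_ excludes only inputs where both Pythons raise ValueError: char = "" with nonempty data.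
def Pre_operationSplit (data : List String) (char : String) : Prop := data = [] ∨ char ≠ ""
instance (data : List String) (char : String) : Decidable (Pre_operationSplit data char) := by unfold Pre_operationSplit; infer_instance
def pvWitness_operationSplit : List String × String := (["a,b", "c"], ",")
def Spec_operationSplit (data : List String) (char : String) (out : List String) : Prop := out = operationSplit_alt data char
instance (data : List String) (char : String) (out : List String) : Decidable (Spec_operationSplit data char out) := by unfold Spec_operationSplit; infer_instance

-- ===== CLAIM (what is proved, stated in full; the proofs are below) =====
def Claim_equal_operationSplit : Prop := ∀ (data : List String) (char : String), Dom_operationSplit data char → Pre_operationSplit data char → Spec_operationSplit data char (operationSplit data char)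

-- ===== LEMMAS AND PROOFS =====

-- splitOn's worker never returns the empty list
theorem pv_go_ne_nil (sep : List Char) (fuel : Nat) :
    ∀ (l cur : List Char) (acc : List (List Char)),
      PySem.Chars.splitOn.go sep fuel l cur acc ≠ [] := by
  induction fuel with
  | zero => intro l cur acc; simp [PySem.Chars.splitOn.go]
  | succ fuel ih =>
    intro l cur acc
    cases l with
    | nil => simp [PySem.Chars.splitOn.go]
    | cons c rest =>
      simp only [PySem.Chars.splitOn.go]
      split
      · exact ih _ _ _
      · exact ih _ _ _

-- if sep does not occur in l, the worker returns the single piece cur.reverse ++ l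
theorem pv_go_no_occ (sep : List Char) (fuel : Nat) :
    ∀ (l cur : List Char) (acc : List (List Char)), ¬ sep <:+: l →
      PySem.Chars.splitOn.go sep fuel l cur acc = acc.reverse ++ [cur.reverse ++ l] := by
  induction fuel with
  | zero => intro l cur acc _; simp [PySem.Chars.splitOn.go]
  | succ fuel ih =>
    intro l cur acc h
    cases l with
    | nil => simp [PySem.Chars.splitOn.go]
    | cons c rest =>
      simp only [PySem.Chars.splitOn.go]
      rw [if_neg]
      · rw [ih rest (c :: cur) acc (fun hi => h (hi.trans (List.suffix_cons c rest).isInfix))]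
        simp
      · intro hp
        exact h ((List.isPrefixOf_iff_prefix.mp hp).isInfix)

theorem pv_splitOn_not_occ (s sep : List Char) (h : ¬ sep <:+: s) :
    PySem.Chars.splitOn s sep = [s] := by
  have := pv_go_no_occ sep (s.length + 1) s [] [] h
  simpa [PySem.Chars.splitOn] using this

-- the worker's result does not depend on the fuel once fuel ≥ l.length + 1 (sep ≠ [])
theorem pv_go_fuel (sep : List Char) (hsep : sep ≠ []) :
    ∀ (fuel : Nat) (l cur : List Char) (acc : List (List Char)), l.length + 1 ≤ fuel →
      PySem.Chars.splitOn.go sep fuel l cur acc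
        = PySem.Chars.splitOn.go sep (l.length + 1) l cur acc := by
  intro fuel
  induction fuel using Nat.strong_induction_on with
  | _ fuel ih =>
    cases fuel with
    | zero => intro l cur acc hle; omega
    | succ f =>
      intro l cur acc hle
      cases l with
      | nil => simp [PySem.Chars.splitOn.go]
      | cons c rest =>
        have hslen : 1 ≤ sep.length := List.length_pos_of_ne_nil hsep
        by_cases hp : sep.isPrefixOf (c :: rest) = true
        · have hdrop : (List.drop sep.length (c :: rest)).length + 1 ≤ rest.length + 1 := by
            simp only [List.length_drop, List.length_cons]
            omega
          simp only [PySem.Chars.splitOn.go, if_pos hp, List.length_cons]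
          rw [ih f (by omega) (List.drop sep.length (c :: rest)) [] (cur.reverse :: acc)
                (by simp only [List.length_cons] at hle; omega),
              ih (rest.length + 1) (by simp only [List.length_cons] at hle; omega)
                (List.drop sep.length (c :: rest)) [] (cur.reverse :: acc) hdrop]
        · simp only [PySem.Chars.splitOn.go, if_neg hp, List.length_cons]
          rw [ih f (by omega) rest (c :: cur) acc
                (by simp only [List.length_cons] at hle; omega)]

-- the accumulator is only ever prepended (reversed) to the result
theorem pv_go_acc (sep : List Char) (fuel : Nat) :
    ∀ (l cur : List Char) (acc : List (List Char)),
      PySem.Chars.splitOn.go sep fuel l cur acc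
        = acc.reverse ++ PySem.Chars.splitOn.go sep fuel l cur [] := by
  induction fuel with
  | zero => intro l cur acc; simp [PySem.Chars.splitOn.go]
  | succ fuel ih =>
    intro l cur acc
    cases l with
    | nil => simp [PySem.Chars.splitOn.go]
    | cons c rest =>
      simp only [PySem.Chars.splitOn.go]
      split
      · rw [ih _ _ (cur.reverse :: acc), ih _ _ ([cur.reverse])]
        simp
      · exact ih _ _ _

-- walking past i occurrence-free characters
theorem pv_go_walk (sep : List Char) :
    ∀ (i : Nat) (l cur : List Char) (acc : List (List Char)), i ≤ l.length →
      (∀ j < i, ¬ sep <+: l.drop j) →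
      PySem.Chars.splitOn.go sep (l.length + 1) l cur acc
        = PySem.Chars.splitOn.go sep ((l.drop i).length + 1) (l.drop i)
            ((l.take i).reverse ++ cur) acc := by
  intro i
  induction i with
  | zero => intro l cur acc _ _; simp
  | succ i ih =>
    intro l cur acc hlen hocc
    cases l with
    | nil => simp at hlen
    | cons c rest =>
      have hp : sep.isPrefixOf (c :: rest) = false := by
        rw [Bool.eq_false_iff]
        intro hp
        exact hocc 0 (Nat.succ_pos _) (by simpa using List.isPrefixOf_iff_prefix.mp hp)
      simp only [List.length_cons, PySem.Chars.splitOn.go, hp, Bool.false_eq_true, if_false]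
      rw [ih rest (c :: cur) acc (by simpa using hlen)
          (fun j hj => by simpa using hocc (j + 1) (by omega))]
      simp [List.take_succ_cons, List.drop_succ_cons]

-- splitting at the FIRST occurrence of sep (at index i)
theorem pv_splitOn_cut (sep l : List Char) (hsep : sep ≠ []) (i : Nat)
    (hlen : i ≤ l.length) (hat : sep <+: l.drop i) (hfirst : ∀ j < i, ¬ sep <+: l.drop j) :
    PySem.Chars.splitOn l sep
      = l.take i :: PySem.Chars.splitOn (l.drop (i + sep.length)) sep := by
  have hslen : 1 ≤ sep.length := by
    cases sep with
    | nil => exact absurd rfl hsep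
    | cons _ _ => simp
  unfold PySem.Chars.splitOn
  rw [pv_go_walk sep i l [] [] hlen hfirst]
  have hdne : l.drop i ≠ [] := by
    intro h
    rw [h] at hat
    exact hsep (List.prefix_nil.mp hat)
  obtain ⟨c, rest, hcr⟩ := List.exists_cons_of_ne_nil hdne
  have hp : sep.isPrefixOf (l.drop i) = true := List.isPrefixOf_iff_prefix.mpr hat
  rw [hcr] at hp ⊢
  have hlen2 : (c :: rest).length + 1 = rest.length + 1 + 1 := by simp
  rw [hlen2]
  simp only [PySem.Chars.splitOn.go, hp, if_pos]
  rw [pv_go_acc]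
  have hdd : List.drop sep.length (c :: rest) = l.drop (i + sep.length) := by
    rw [← hcr, List.drop_drop, Nat.add_comm]
  rw [hdd]
  have hfuel : (l.drop (i + sep.length)).length + 1 ≤ rest.length + 1 := by
    have h1 : (l.drop (i + sep.length)).length = l.length - (i + sep.length) := by simp
    have h2 : rest.length + 1 = (l.drop i).length := by rw [hcr]; simp
    simp only [List.length_drop] at h2 ⊢
    omega
  rw [pv_go_fuel sep hsep _ _ _ _ hfuel]
  simp only [List.append_nil, List.reverse_reverse, List.reverse_cons, List.reverse_nil,
    List.nil_append, PySem.Chars.splitOn, List.singleton_append]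

-- the scanner's fuel does not matter once fuel ≥ l.length + 1 (sep ≠ [])
theorem pv_scan_fuel (sep : List Char) (hsep : sep ≠ []) :
    ∀ (fuel : Nat) (l : List Char), l.length + 1 ≤ fuel →
      pvScan sep fuel l = pvScan sep (l.length + 1) l := by
  intro fuel
  induction fuel using Nat.strong_induction_on with
  | _ fuel ih =>
    cases fuel with
    | zero => intro l hle; omega
    | succ f =>
      intro l hle
      simp only [pvScan]
      by_cases hneg : PySem.Chars.find l sep < 0
      · simp [hneg]
      · have hpos : 0 ≤ PySem.Chars.find l sep := by omega
        have hslen : 1 ≤ sep.length := List.length_pos_of_ne_nil hsep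
        have hinf : sep <:+: l := (PySem.Chars.find_nonneg_iff l sep).mp hpos
        have hlpos : 1 ≤ l.length := le_trans hslen hinf.length_le
        have hle' : PySem.Chars.find l sep ≤ l.length := PySem.Chars.find_le_length l sep
        have hslice : PySem.List.slice l (some (PySem.Chars.find l sep + sep.length)) none
            = l.drop (PySem.Chars.find l sep + sep.length).toNat := by
          rw [PySem.List.slice_from _ (by omega)]
        have hfuel2 : (l.drop (PySem.Chars.find l sep + sep.length).toNat).length + 1 ≤ l.length := by
          simp only [List.length_drop]
          omega
        simp only [hneg, if_false, hslice]
        rw [ih f (by omega) (l.drop (PySem.Chars.find l sep + sep.length).toNat) (by omega),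
            ih l.length (by omega) (l.drop (PySem.Chars.find l sep + sep.length).toNat) hfuel2]

-- the scanner computes head-segment + (sep, segment) interleave of splitOn
theorem pv_scan_eq (sep : List Char) (hsep : sep ≠ []) :
    ∀ (n : Nat) (l : List Char), l.length ≤ n →
      pvScan sep (l.length + 1) l
        = ((PySem.Chars.splitOn l sep).map String.ofList).head! ::
          (((PySem.Chars.splitOn l sep).map String.ofList).tail).flatMap
            (fun s => [String.ofList sep, s]) := by
  intro n
  induction n with
  | zero =>
    intro l hlen
    have hl : l = [] := List.eq_nil_of_length_eq_zero (Nat.le_zero.mp hlen)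
    subst hl
    have hno : ¬ sep <:+: ([] : List Char) := fun h => hsep (List.eq_nil_of_infix_nil h)
    have hfind : PySem.Chars.find [] sep = -1 := (PySem.Chars.find_eq_neg_one_iff [] sep).mpr hno
    rw [pv_splitOn_not_occ [] sep hno]
    simp [pvScan, hfind]
  | succ n ih =>
    intro l hlen
    simp only [pvScan]
    by_cases hneg : PySem.Chars.find l sep < 0
    · have hne : PySem.Chars.find l sep = -1 := by
        have := PySem.Chars.neg_one_le_find l sep
        omega
      have hno : ¬ sep <:+: l := (PySem.Chars.find_eq_neg_one_iff l sep).mp hne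
      rw [pv_splitOn_not_occ l sep hno]
      simp [hneg]
    · have hpos : 0 ≤ PySem.Chars.find l sep := by omega
      have hslen : 1 ≤ sep.length := List.length_pos_of_ne_nil hsep
      have hle' : PySem.Chars.find l sep ≤ l.length := PySem.Chars.find_le_length l sep
      obtain ⟨hat, hfirst⟩ := PySem.Chars.find_spec (s := l) (sub := sep) hpos
      set i : Nat := (PySem.Chars.find l sep).toNat with hi
      have hcut := pv_splitOn_cut sep l hsep i (by omega) hat hfirst
      have hslice1 : PySem.List.slice l none (some (PySem.Chars.find l sep)) = l.take i := by
        rw [PySem.List.slice_to _ hpos]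
      have hslice2 : PySem.List.slice l (some (PySem.Chars.find l sep + sep.length)) none
          = l.drop (i + sep.length) := by
        rw [PySem.List.slice_from _ (by omega)]
        congr 1
        omega
      have hinf : sep <:+: l := (PySem.Chars.find_nonneg_iff l sep).mp hpos
      have hlpos : 1 ≤ l.length := le_trans hslen hinf.length_le
      have hshort : (l.drop (i + sep.length)).length < l.length := by
        simp only [List.length_drop]
        omega
      rw [hslice1, hslice2,
        pv_scan_fuel sep hsep l.length (l.drop (i + sep.length))
          (by simp only [List.length_drop]; omega)]
      rw [ih (l.drop (i + sep.length)) (by omega), hcut]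
      have hne2 : PySem.Chars.splitOn (l.drop (i + sep.length)) sep ≠ [] := by
        simpa [PySem.Chars.splitOn] using
          pv_go_ne_nil sep ((l.drop (i + sep.length)).length + 1) (l.drop (i + sep.length)) [] []
      obtain ⟨a, t, hat2⟩ := List.exists_cons_of_ne_nil hne2
      simp only [hneg, if_false, hat2]
      simp

-- A's per-item step equals appending B's scanner tokens, for a nonempty separator
theorem pv_step_eq (char item : String) (hchar : char ≠ "") (output : List String) :
    (if PySem.Str.isIn char item then
      match PySem.Str.split? item char with
      | some segments =>
        let out2 := segments.foldl (fun o seg => o ++ [seg, char]) output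
        match PySem.List.pop? out2 (-1) with
        | some (_, o) => o
        | none => []
      | none => []
    else output ++ [item])
      = output ++ pvScan char.toList (item.toList.length + 1) item.toList := by
  have hsepne : char.toList ≠ [] := fun hh => hchar (by
    have := congrArg String.ofList hh; simpa using this)
  have hchar' : String.ofList char.toList = char := by simp
  have hne0 : PySem.Chars.splitOn item.toList char.toList ≠ [] := by
    simpa [PySem.Chars.splitOn] using
      pv_go_ne_nil char.toList (item.toList.length + 1) item.toList [] []
  obtain ⟨a0, t0, hat⟩ := List.exists_cons_of_ne_nil hne0
  have hsplit : PySem.Str.split? item char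
      = some ((PySem.Chars.splitOn item.toList char.toList).map String.ofList) := by
    simp [PySem.Str.split?, PySem.Chars.split?, List.isEmpty_iff, hsepne]
  have hscan := pv_scan_eq char.toList hsepne item.toList.length item.toList le_rfl
  rw [hchar', hat] at hscan
  simp only [List.map_cons, List.head!, List.tail] at hscan
  by_cases hin : PySem.Str.isIn char item = true
  · rw [if_pos hin, hsplit]
    simp only [hat, List.map_cons]
    rw [PySem.List.foldl_append_eq_flatMap]
    have hflat : (String.ofList a0 :: t0.map String.ofList).flatMap (fun s => [s, char])
        = (String.ofList a0 :: (t0.map String.ofList).flatMap (fun s => [char, s])) ++ [char] := by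
      generalize t0.map String.ofList = t
      generalize String.ofList a0 = a
      induction t generalizing a with
      | nil => rfl
      | cons b t ihh =>
        have := ihh b
        simp only [List.flatMap_cons, List.cons_append, List.nil_append] at this ⊢
        rw [this]
    rw [show output ++ (String.ofList a0 :: t0.map String.ofList).flatMap (fun s => [s, char])
          = (output ++ (String.ofList a0 :: (t0.map String.ofList).flatMap (fun s => [char, s]))) ++ [char] by
        rw [List.append_assoc, ← hflat]]
    rw [PySem.List.pop?_last, hscan]
  · rw [if_neg hin]
    have hin' : ¬ char.toList <:+: item.toList := by
      rw [← PySem.Chars.isIn_eq_false_iff, ← PySem.Str.isIn_eq]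
      simpa using hin
    have hone : PySem.Chars.splitOn item.toList char.toList = [item.toList] :=
      pv_splitOn_not_occ _ _ hin'
    rw [hone] at hat
    obtain ⟨ha0, ht0⟩ : a0 = item.toList ∧ t0 = [] := by
      simpa [eq_comm] using hat
    subst ha0 ht0
    rw [hscan]
    simp

-- ===== VERDICT (by name: the statement is the Claim_ definition above) =====
theorem operationSplit_spec : Claim_equal_operationSplit := by
  intro data char _ hpre
  unfold Spec_operationSplit
  rcases hpre with hnil | hchar
  · subst hnil; rfl
  · unfold operationSplit operationSplit_alt
    have hempty : char.toList.isEmpty = false := by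
      rcases h : char.toList with _ | _
      · exact absurd (by have := congrArg String.ofList h; simpa using this) hchar
      · simp
    rw [PySem.List.foldl_congr_mem data _
      (fun output item => output ++ pvScan char.toList (item.toList.length + 1) item.toList) []
      (fun acc x _ => pv_step_eq char x hchar acc)]
    apply PySem.List.foldl_congr_mem
    intro acc x _
    rw [hempty]
    simp
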